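-- pv_equiv track=rewrite | github.com/mrpc25/Taiko-Fumen-Analyzer | taiko.py | DefineDiffucultyOfComplex
-- ===== SOURCE A (Python) =====
-- def DefineDiffucultyOfComplex(random_complex):
--   ppp = random_complex
--   aaa = ""
--   for _ in ppp:
--     if(_ == "1" or _ == "3"):
--       aaa = aaa + "d"
--     elif(_ == "2" or _ == "4"):
--       aaa = aaa + "k"
--
--   sign_change = 0
--   hand_change = 0
--   if(len(aaa)!=0):
--     temp = aaa[0]
--     sign_change = 0
--     temp_str = ""
--     new_str = []
--
--     for _ in aaa:
--       if(temp!=_):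
--         temp = _
--         sign_change = sign_change + 1
--
--       if(len(temp_str)<2):
--         temp_str = temp_str + _
--       else:
--         new_str.append(temp_str)
--         temp_str = ""
--         temp_str = temp_str + _
--
--     new_str.append(temp_str)
--
--     hand_change = 0
--     for k in range(len(new_str)-1):
--       if(new_str[k][0]!=new_str[k][1] and new_str[k][1]==new_str[k+1][0]):
--         hand_change = hand_change + 1
--
--   return sign_change, hand_change
-- ===== SOURCE B (Python) =====
-- def DefineDiffucultyOfComplex(random_complex):
--   # single streaming pass: never builds the filtered string or the chunk list
--   j = 0                 # count of filtered notes seen so far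
--   prev2 = prev1 = ""
--   sign_change = 0
--   hand_change = 0
--   for ch in random_complex:
--     if ch == "1" or ch == "3":
--       c = "d"
--     elif ch == "2" or ch == "4":
--       c = "k"
--     else:
--       continue
--     if j > 0 and c != prev1:
--       sign_change += 1
--     if j >= 2 and j % 2 == 0 and prev2 != prev1 and prev1 == c:
--       hand_change += 1
--     prev2, prev1 = prev1, c
--     j += 1
--   return sign_change, hand_change
-- ===== Notes on version B (the rewrite author's own statement) =====
-- stated objective: simpler
-- what changed: A makes three passes (build the filtered d/k string, re-scan it while chopping it into 2-char chunks into a list, then scan the chunk list for hand changes); B is one streaming pass over the input keeping only a note counter, the last two filtered notes and the two tallies, never materialising the filtered string or the chunk list.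
import Mathlib
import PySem

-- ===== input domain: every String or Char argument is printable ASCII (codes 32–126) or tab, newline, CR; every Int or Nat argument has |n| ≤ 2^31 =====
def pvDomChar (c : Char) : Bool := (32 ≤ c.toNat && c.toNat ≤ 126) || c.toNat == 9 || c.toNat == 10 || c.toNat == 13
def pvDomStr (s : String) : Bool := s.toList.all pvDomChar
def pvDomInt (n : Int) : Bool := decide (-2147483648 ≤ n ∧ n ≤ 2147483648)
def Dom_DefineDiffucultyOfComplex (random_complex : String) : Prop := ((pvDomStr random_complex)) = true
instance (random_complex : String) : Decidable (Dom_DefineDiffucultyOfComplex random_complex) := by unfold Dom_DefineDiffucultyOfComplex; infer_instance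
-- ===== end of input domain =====

-- B replaces A's three passes (build filtered string, re-scan it building 2-chunks, scan the
-- chunk list) by one streaming pass over the input; objective: simpler, same exact result.

-- ===== PORT A =====
-- aaa = aaa + "d"/"k" over the input characters
def pvBuildStep (acc : List Char) (c : Char) : List Char :=
  if c = '1' ∨ c = '3' then acc ++ ['d']
  else if c = '2' ∨ c = '4' then acc ++ ['k']
  else acc

-- loop body over aaa: state (temp, sign_change, temp_str, new_str)
def pvMainStep (st : Char × Int × List Char × List (List Char)) (c : Char) :
    Char × Int × List Char × List (List Char) :=
  let (temp, sign, temp_str, new_str) := st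
  let (temp, sign) := if temp ≠ c then (c, sign + 1) else (temp, sign)
  if temp_str.length < 2 then (temp, sign, temp_str ++ [c], new_str)
  else (temp, sign, [c], new_str ++ [temp_str])

-- body of `for k in range(len(new_str)-1)`; every index is in range there, so getD is exact
def pvHandStep (cs : List (List Char)) (h : Int) (k : Nat) : Int :=
  if (cs.getD k []).getD 0 ' ' ≠ (cs.getD k []).getD 1 ' ' ∧
     (cs.getD k []).getD 1 ' ' = (cs.getD (k+1) []).getD 0 ' ' then h + 1 else h

def DefineDiffucultyOfComplex (random_complex : String) : Int × Int :=
  let aaa := random_complex.toList.foldl pvBuildStep []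
  if aaa.length ≠ 0 then
    let st := aaa.foldl pvMainStep (aaa.getD 0 ' ', 0, [], [])   -- aaa[0] exists here
    let new_str := st.2.2.2 ++ [st.2.2.1]
    let hand_change := (List.range (new_str.length - 1)).foldl (pvHandStep new_str) 0
    (st.2.1, hand_change)
  else (0, 0)

-- ===== PORT B =====
-- state (j, prev2, prev1, sign_change, hand_change); prev chars start as ' ' — the Python
-- starts them as "" and, like here, never reads them before setting them (guarded by j)
def pvAltStep (st : Int × Char × Char × Int × Int) (ch : Char) : Int × Char × Char × Int × Int :=
  let (j, prev2, prev1, sign, hand) := st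
  if ch = '1' ∨ ch = '3' then
    let sign := if 0 < j ∧ 'd' ≠ prev1 then sign + 1 else sign
    let hand := if 2 ≤ j ∧ j % 2 = 0 ∧ prev2 ≠ prev1 ∧ prev1 = 'd' then hand + 1 else hand
    (j + 1, prev1, 'd', sign, hand)
  else if ch = '2' ∨ ch = '4' then
    let sign := if 0 < j ∧ 'k' ≠ prev1 then sign + 1 else sign
    let hand := if 2 ≤ j ∧ j % 2 = 0 ∧ prev2 ≠ prev1 ∧ prev1 = 'k' then hand + 1 else hand
    (j + 1, prev1, 'k', sign, hand)
  else st

def DefineDiffucultyOfComplex_alt (random_complex : String) : Int × Int :=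
  let st := random_complex.toList.foldl pvAltStep (0, ' ', ' ', 0, 0)
  (st.2.2.2.1, st.2.2.2.2)

-- ===== PRECONDITION & SPEC =====
def Spec_DefineDiffucultyOfComplex (random_complex : String) (out : Int × Int) : Prop := out = DefineDiffucultyOfComplex_alt random_complex
instance (random_complex : String) (out : Int × Int) : Decidable (Spec_DefineDiffucultyOfComplex random_complex out) := by unfold Spec_DefineDiffucultyOfComplex; infer_instance

-- ===== CLAIM (what is proved, stated in full; the proofs are below) =====
def Claim_equal_DefineDiffucultyOfComplex : Prop := ∀ (random_complex : String), Dom_DefineDiffucultyOfComplex random_complex → Spec_DefineDiffucultyOfComplex random_complex (DefineDiffucultyOfComplex random_complex)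

-- ===== LEMMAS AND PROOFS =====

-- the filtered note list
def pvFilt (l : List Char) : List Char :=
  l.flatMap (fun c => if c = '1' ∨ c = '3' then ['d'] else if c = '2' ∨ c = '4' then ['k'] else [])

-- number of adjacent sign changes after a previous char a
def pvSc (a : Char) : List Char → Int
  | [] => 0
  | c :: t => (if a ≠ c then 1 else 0) + pvSc c t

-- hand changes: b = "current filtered index is even", p2 p1 the two previous chars
def pvHc (b : Bool) (p2 p1 : Char) : List Char → Int
  | [] => 0
  | c :: t => if b then (if p2 ≠ p1 ∧ p1 = c then 1 else 0) + pvHc false p1 c t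
              else pvHc true p1 c t

def pvTarget : List Char → Int × Int
  | [] => (0, 0)
  | [a] => (pvSc a [], 0)
  | a :: b :: t => (pvSc a (b :: t), pvHc true a b t)

def pvChunks : List Char → List (List Char)
  | [] => []
  | [a] => [[a]]
  | a :: b :: t => [a, b] :: pvChunks t

def pvHandChunks : List (List Char) → Int
  | x :: y :: r =>
      (if x.getD 0 ' ' ≠ x.getD 1 ' ' ∧ x.getD 1 ' ' = y.getD 0 ' ' then 1 else 0) +
      pvHandChunks (y :: r)
  | _ => 0

theorem pvBuild_eq (l : List Char) (acc : List Char) :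
    l.foldl pvBuildStep acc = acc ++ pvFilt l := by
  induction l generalizing acc with
  | nil => simp [pvFilt]
  | cons c t ih =>
      simp only [List.foldl_cons, pvFilt, List.flatMap_cons, pvBuildStep]
      split_ifs <;> simp_all [pvFilt]

theorem pvMain_inv (t : List Char) (a p : Char) (s : Int) (ns : List (List Char)) :
    ((t.foldl pvMainStep (a, s, [p], ns)).2.1,
     (t.foldl pvMainStep (a, s, [p], ns)).2.2.2 ++ [(t.foldl pvMainStep (a, s, [p], ns)).2.2.1])
      = (s + pvSc a t, ns ++ pvChunks (p :: t)) := by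
  induction t using pvChunks.induct generalizing a p s ns with
  | case1 => simp [pvSc, pvChunks]
  | case2 c =>
      simp [pvMainStep, pvSc, pvChunks]
      split_ifs <;> simp_all <;> ring
  | case3 c d t ih =>
      have h1 : pvMainStep (a, s, [p], ns) c
          = (c, s + (if a ≠ c then 1 else 0), [p, c], ns) := by
        simp only [pvMainStep]
        split_ifs with h <;> simp_all
      have h2 : pvMainStep (c, s + (if a ≠ c then 1 else 0), [p, c], ns) d
          = (d, s + (if a ≠ c then 1 else 0) + (if c ≠ d then 1 else 0), [d], ns ++ [[p, c]]) := by
        simp only [pvMainStep]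
        split_ifs with h <;> simp_all
      simp only [List.foldl_cons, h1, h2, ih]
      simp [pvSc, pvChunks]
      ring

theorem pvRange_hand (cs : List (List Char)) (h : Int) :
    (List.range (cs.length - 1)).foldl (pvHandStep cs) h = h + pvHandChunks cs := by
  induction cs generalizing h with
  | nil => simp [pvHandChunks]
  | cons x cs' ih =>
      cases cs' with
      | nil => simp [pvHandChunks]
      | cons y r =>
          have hlen : (x :: y :: r).length - 1 = r.length + 1 := by simp
          rw [hlen, List.range_succ_eq_map, List.foldl_cons, List.foldl_map]
          have hstep : ∀ (h : Int) (k : Nat),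
              pvHandStep (x :: y :: r) h (k + 1) = pvHandStep (y :: r) h k := by
            intro h k; simp [pvHandStep]
          have hfold : ∀ (h : Int),
              (List.range r.length).foldl (fun h k => pvHandStep (x :: y :: r) h (k + 1)) h
                = (List.range r.length).foldl (pvHandStep (y :: r)) h := by
            intro h
            apply List.foldl_ext
            intro acc b _
            exact hstep acc b
          have hr : (y :: r).length - 1 = r.length := by simp
          rw [hfold, ← hr, ih]
          simp only [pvHandChunks, pvHandStep, List.getD_cons_zero, List.getD_cons_succ]
          split_ifs <;> simp_all <;> ring

theorem pvChunks_hand (t : List Char) (a b : Char) :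
    pvHandChunks ([a, b] :: pvChunks t) = pvHc true a b t := by
  induction t using pvChunks.induct generalizing a b with
  | case1 => simp [pvChunks, pvHandChunks, pvHc]
  | case2 c =>
      simp [pvChunks, pvHandChunks, pvHc]
  | case3 c d t ih =>
      simp only [pvChunks, pvHandChunks, pvHc, ih]
      simp [List.getD]

theorem pvAlt_skip (l : List Char) (st : Int × Char × Char × Int × Int) :
    l.foldl pvAltStep st = (pvFilt l).foldl
      (fun st c => pvAltStep st (if c = 'd' then '1' else '2')) st := by
  induction l generalizing st with
  | nil => simp [pvFilt]
  | cons c t ih =>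
      simp only [List.foldl_cons, pvFilt, List.flatMap_cons] at *
      by_cases h1 : c = '1' ∨ c = '3'
      · simp [h1, ih, pvAltStep]
      · by_cases h2 : c = '2' ∨ c = '4'
        · have : ¬ ((('k' : Char) = 'd')) := by decide
          simp [h1, h2, ih, pvAltStep, this]
        · have : pvAltStep st c = st := by
            simp [pvAltStep, h1, h2]
          simp [h1, h2, ih, this]

-- one step of B on an already-filtered char c ('d' or 'k')
theorem pvAlt_core (c : Char) (hc : c = 'd' ∨ c = 'k') (j : Int) (p2 p1 : Char) (s h : Int) :
    pvAltStep (j, p2, p1, s, h) (if c = 'd' then '1' else '2')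
      = (j + 1, p1, c,
         (if 0 < j ∧ c ≠ p1 then s + 1 else s),
         (if 2 ≤ j ∧ j % 2 = 0 ∧ p2 ≠ p1 ∧ p1 = c then h + 1 else h)) := by
  rcases hc with h' | h' <;> subst h' <;> simp [pvAltStep]

theorem pvAlt_inv (t : List Char) (hd : ∀ c ∈ t, c = 'd' ∨ c = 'k')
    (j : Int) (hj : 2 ≤ j) (p2 p1 : Char) (s h : Int) :
    ((t.foldl (fun st c => pvAltStep st (if c = 'd' then '1' else '2')) (j, p2, p1, s, h)).2.2.2.1,
     (t.foldl (fun st c => pvAltStep st (if c = 'd' then '1' else '2')) (j, p2, p1, s, h)).2.2.2.2)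
      = (s + pvSc p1 t, h + pvHc (j % 2 == 0) p2 p1 t) := by
  induction t generalizing j p2 p1 s h with
  | nil => simp [pvSc, pvHc]
  | cons c t ih =>
      have hc : c = 'd' ∨ c = 'k' := hd c (by simp)
      have hd' : ∀ x ∈ t, x = 'd' ∨ x = 'k' := fun x hx => hd x (by simp [hx])
      simp only [List.foldl_cons, pvAlt_core c hc]
      rw [ih hd' (j + 1) (by omega)]
      have hpar : ((j + 1) % 2 == 0) = !(j % 2 == 0) := by
        by_cases hp : j % 2 = 0
        · have : (j + 1) % 2 = 1 := by omega
          simp [hp, this]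
        · have h1 : j % 2 = 1 := by omega
          have : (j + 1) % 2 = 0 := by omega
          simp [h1, this]
      have h0j : 0 < j := by omega
      simp only [Prod.mk.injEq]
      refine ⟨?_, ?_⟩
      · have hite : (if 0 < j ∧ c ≠ p1 then s + 1 else s)
            = s + (if p1 ≠ c then 1 else 0) := by
          by_cases hce : p1 = c
          · subst hce; simp
          · have hcp : c ≠ p1 := fun hh => hce hh.symm
            rw [if_pos ⟨h0j, hcp⟩, if_pos hce]
        simp only [pvSc, hite]
        ring
      · by_cases hp : j % 2 = 0
        · simp only [pvHc, hpar, hp, hj, true_and]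
          norm_num
          split_ifs <;> ring
        · have hb : (j % 2 == 0) = false := by simp [hp]
          simp [pvHc, hpar, hb, hp]

theorem pvFilt_mem (l : List Char) : ∀ c ∈ pvFilt l, c = 'd' ∨ c = 'k' := by
  intro c hcmem
  induction l with
  | nil => simp [pvFilt] at hcmem
  | cons a t ih =>
      simp only [pvFilt, List.flatMap_cons, List.mem_append] at hcmem
      rcases hcmem with h | h
      · split_ifs at h <;> simp_all
      · exact ih h

-- B on a string = pvTarget of the filtered list
theorem pvAlt_eq (s : String) :
    DefineDiffucultyOfComplex_alt s = pvTarget (pvFilt s.toList) := by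
  unfold DefineDiffucultyOfComplex_alt
  rw [pvAlt_skip]
  have hmem := pvFilt_mem s.toList
  cases hl : pvFilt s.toList with
  | nil => simp [pvTarget]
  | cons a t =>
      rw [hl] at hmem
      have ha : a = 'd' ∨ a = 'k' := hmem a (by simp)
      cases t with
      | nil =>
          simp only [List.foldl_cons, List.foldl_nil, pvAlt_core a ha, pvTarget, pvSc]
          norm_num
      | cons b t' =>
          have hb : b = 'd' ∨ b = 'k' := hmem b (by simp)
          have hstep1 := pvAlt_core a ha 0 ' ' ' ' 0 0
          have hstep2 := pvAlt_core b hb 1 ' ' a 0 0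
          simp only [List.foldl_cons, hstep1]
          norm_num at hstep2 ⊢
          rw [hstep2]
          have := pvAlt_inv t' (fun x hx => hmem x (by simp [hx])) 2 (by omega) a b
            (if b ≠ a then 1 else 0) 0
          norm_num at this
          rw [this]
          simp only [pvTarget, pvSc]
          by_cases hab : a = b
          · subst hab; simp
          · have hba : b ≠ a := fun hh => hab hh.symm
            simp [hab, hba]

-- A on a string = pvTarget of the filtered list
theorem pvA_eq (s : String) :
    DefineDiffucultyOfComplex s = pvTarget (pvFilt s.toList) := by
  unfold DefineDiffucultyOfComplex
  rw [pvBuild_eq]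
  simp only [List.nil_append]
  cases hl : pvFilt s.toList with
  | nil => simp [pvTarget]
  | cons a t =>
      have hne : (a :: t).length ≠ 0 := by simp
      simp only [List.getD_cons_zero, List.foldl_cons]
      have h1 : pvMainStep (a, 0, [], []) a = (a, 0, [a], []) := by
        simp [pvMainStep]
      rw [h1]
      have hm := pvMain_inv t a a 0 []
      have hsign : (t.foldl pvMainStep (a, 0, [a], [])).2.1 = pvSc a t := by
        have := congrArg Prod.fst hm; simpa using this
      have hns : (t.foldl pvMainStep (a, 0, [a], [])).2.2.2 ++
          [(t.foldl pvMainStep (a, 0, [a], [])).2.2.1] = pvChunks (a :: t) := by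
        have := congrArg Prod.snd hm; simpa using this
      rw [hsign, hns, pvRange_hand]
      cases t with
      | nil => simp [pvChunks, pvHandChunks, pvTarget]
      | cons b t' =>
          simp only [pvChunks, pvChunks_hand, pvTarget]
          norm_num

-- ===== VERDICT (by name: the statement is the Claim_ definition above) =====
theorem DefineDiffucultyOfComplex_spec : Claim_equal_DefineDiffucultyOfComplex := by
  intro s _
  unfold Spec_DefineDiffucultyOfComplex
  rw [pvA_eq, pvAlt_eq]
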